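-- pv_equiv track=rewrite | github.com/Kdelphinus/Python_study | Baekjoon/silver/silver III/2346_popping_a_ballon.py | popping
-- ===== SOURCE A (Python) =====
-- from collections import deque
--
-- def clock_wise(ballon: list, n: int) -> list:
--     ballon.popleft()
--     if not ballon:
--         return ballon
--     for _ in range(n - 1):
--         tmp = ballon.popleft()
--         ballon.append(tmp)
--     return ballon
--
-- def counter_clock_wise(ballon: list, n: int) -> list:
--     ballon.popleft()
--     if not ballon:
--         return ballon
--     for _ in range(n):
--         tmp = ballon.pop()
--         ballon.appendleft(tmp)
--     return ballon
--
-- def popping(ballon: list) -> list: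
--     ballon = deque([(i + 1, b) for i, b in enumerate(ballon)])
--     pop = []
--
--     while ballon:
--         idx, move = ballon[0]
--         pop.append(idx)
--         flag = 1 if move < 0 else -1
--         ballon = (
--             clock_wise(ballon, abs(move))
--             if move > 0
--             else counter_clock_wise(ballon, abs(move))
--         )
--
--     return pop
-- ===== SOURCE B (Python) =====
-- def popping(ballon: list) -> list:
--     # No deque, no element-by-element rotation: keep the remaining balloons in a
--     # plain list and a cursor, and jump to the next balloon with one modular step.
--     rem = [(i + 1, m) for i, m in enumerate(ballon)]
--     out = []
--     pos = 0
--     for _ in range(len(ballon)):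
--         idx, m = rem[pos]
--         out.append(idx)
--         rem = rem[:pos] + rem[pos + 1:]
--         if rem:
--             pos = (pos + m - 1) % len(rem) if m > 0 else (pos + m) % len(rem)
--     return out
-- ===== Notes on version B (the rewrite author's own statement) =====
-- stated objective: faster
-- what changed: Replaces A's deque that is rotated one element at a time (abs(move) single-step rotations per popped balloon) by a plain list plus a cursor that jumps to the next balloon with a single modular-arithmetic step per pop.
import Mathlib
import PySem

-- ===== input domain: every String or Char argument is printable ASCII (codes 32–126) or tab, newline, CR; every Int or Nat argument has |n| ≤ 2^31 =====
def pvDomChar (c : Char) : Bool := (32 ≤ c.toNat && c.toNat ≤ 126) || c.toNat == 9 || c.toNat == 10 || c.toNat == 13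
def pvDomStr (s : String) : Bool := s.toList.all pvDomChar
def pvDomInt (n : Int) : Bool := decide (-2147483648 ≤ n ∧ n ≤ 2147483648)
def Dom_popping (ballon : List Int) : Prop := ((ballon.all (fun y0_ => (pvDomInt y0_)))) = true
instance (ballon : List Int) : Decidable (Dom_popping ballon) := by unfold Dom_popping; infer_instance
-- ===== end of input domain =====

-- B replaces A's deque rotated one element at a time (abs(move) single-step rotations per pop)
-- by a plain list with a cursor that jumps to the next balloon in one modular step (faster).

-- ===== PORT A =====
-- `for _ in range(k): tmp = b.popleft(); b.append(tmp)` — k single left-rotations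
def rotL {α : Type} : List α → Nat → List α
  | l, 0 => l
  | [], _ + 1 => []          -- unreachable in A: the deque is nonempty here
  | x :: xs, k + 1 => rotL (xs ++ [x]) k

-- `for _ in range(k): tmp = b.pop(); b.appendleft(tmp)` — k single right-rotations
def rotR {α : Type} : List α → Nat → List α
  | l, 0 => l
  | [], _ + 1 => []          -- unreachable in A: the deque is nonempty here
  | x :: xs, k + 1 => rotR ((x :: xs).getLast (by simp) :: (x :: xs).dropLast) k

def clock_wise (ballon : List (Int × Int)) (n : Nat) : List (Int × Int) :=
  let b := ballon.tail       -- ballon.popleft()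
  if b = [] then b else rotL b (n - 1)

def counter_clock_wise (ballon : List (Int × Int)) (n : Nat) : List (Int × Int) :=
  let b := ballon.tail       -- ballon.popleft()
  if b = [] then b else rotR b n

theorem length_rotL {α : Type} : ∀ (k : Nat) (l : List α), (rotL l k).length = l.length
  | 0, _ => rfl
  | _ + 1, [] => rfl
  | k + 1, x :: xs => by simp [rotL, length_rotL k]

theorem length_rotR {α : Type} : ∀ (k : Nat) (l : List α), (rotR l k).length = l.length
  | 0, _ => rfl
  | _ + 1, [] => rfl
  | k + 1, x :: xs => by simp [rotR, length_rotR k]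

theorem length_clock_wise (b : List (Int × Int)) (n : Nat) :
    (clock_wise b n).length = b.length - 1 := by
  simp only [clock_wise]; split
  · rename_i h; cases b <;> simp_all
  · simp [length_rotL]

theorem length_counter_clock_wise (b : List (Int × Int)) (n : Nat) :
    (counter_clock_wise b n).length = b.length - 1 := by
  simp only [counter_clock_wise]; split
  · rename_i h; cases b <;> simp_all
  · simp [length_rotR]

-- the `while ballon:` loop, accumulating `pop`
def poppingLoop : List (Int × Int) → List Int → List Int
  | [], pop => pop
  | (idx, move) :: tl, pop =>
    poppingLoop
      (if move > 0 then clock_wise ((idx, move) :: tl) move.natAbs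
       else counter_clock_wise ((idx, move) :: tl) move.natAbs)
      (pop ++ [idx])
  termination_by b _ => b.length
  decreasing_by split <;> simp [length_clock_wise, length_counter_clock_wise]

def popping (ballon : List Int) : List Int :=
  poppingLoop ((PySem.List.enumerate ballon 0).map (fun p => (p.1 + 1, p.2))) []

-- ===== PORT B =====
-- the `for _ in range(len(ballon)):` loop of B; `pos` is always a valid index
-- (0 ≤ pos < rem.length) whenever the body runs, so Python's `rem[pos]` is ported as getD
def altLoop : Nat → List (Int × Int) → Int → List Int → List Int
  | 0, _, _, out => out
  | k + 1, rem, pos, out =>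
    let p := rem.getD pos.toNat (0, 0)                      -- idx, m = rem[pos]
    let rem' := PySem.List.slice rem none (some pos) ++
                PySem.List.slice rem (some (pos + 1)) none  -- rem = rem[:pos] + rem[pos+1:]
    let pos' := if rem' = [] then pos
      else if p.2 > 0 then PySem.Int.mod (pos + p.2 - 1) (rem'.length : Int)
      else PySem.Int.mod (pos + p.2) (rem'.length : Int)
    altLoop k rem' pos' (out ++ [p.1])

def popping_alt (ballon : List Int) : List Int :=
  altLoop ballon.length ((PySem.List.enumerate ballon 0).map (fun p => (p.1 + 1, p.2))) 0 []

-- ===== PRECONDITION & SPEC =====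
def Spec_popping (ballon : List Int) (out : List Int) : Prop := out = popping_alt ballon
instance (ballon : List Int) (out : List Int) : Decidable (Spec_popping ballon out) := by unfold Spec_popping; infer_instance

-- ===== CLAIM (what is proved, stated in full; the proofs are below) =====
def Claim_equal_popping : Prop := ∀ (ballon : List Int), Dom_popping ballon → Spec_popping ballon (popping ballon)

-- ===== LEMMAS AND PROOFS =====

theorem rotL_eq_rotate {α : Type} : ∀ (k : Nat) (l : List α), rotL l k = l.rotate k
  | 0, l => by simp [rotL]
  | _ + 1, [] => by simp [rotL]
  | k + 1, x :: xs => by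
    rw [rotL, rotL_eq_rotate k, List.rotate_cons_succ]

theorem last_cons_dropLast_eq_rotate {α : Type} (l : List α) (h : l ≠ []) :
    l.getLast h :: l.dropLast = l.rotate (l.length - 1) := by
  have h1 : l.length - 1 < l.length := by
    cases l with | nil => simp at h | cons a t => simp
  rw [List.rotate_eq_drop_append_take (Nat.le_of_lt h1),
      List.drop_eq_getElem_cons h1,
      show l.length - 1 + 1 = l.length from by omega, List.drop_length,
      List.dropLast_eq_take, List.getLast_eq_getElem]
  simp

theorem rotR_eq_rotate {α : Type} : ∀ (k : Nat) (l : List α),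
    rotR l k = l.rotate ((l.length - 1) * k)
  | 0, l => by simp [rotR]
  | _ + 1, [] => by simp [rotR]
  | k + 1, x :: xs => by
    rw [rotR, rotR_eq_rotate k,
        last_cons_dropLast_eq_rotate (x :: xs) (by simp)]
    rw [List.rotate_rotate, List.length_rotate]
    congr 1
    simp [Nat.mul_succ]
    omega

theorem rotate_cons_erase (rem : List (Int × Int)) (p : Nat) (hp : p < rem.length) :
    rem.rotate p = rem.getD p (0, 0) :: ((rem.take p ++ rem.drop (p + 1)).rotate p) := by
  have hp' : p ≤ (rem.take p ++ rem.drop (p + 1)).length := by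
    simp; omega
  have htake : (rem.take p).length = p := by simp; omega
  have h2 : (rem.take p ++ rem.drop (p + 1)).drop p = rem.drop (p + 1) := by
    have := List.drop_left (l₁ := rem.take p) (l₂ := rem.drop (p + 1))
    rwa [htake] at this
  have h3 : (rem.take p ++ rem.drop (p + 1)).take p = rem.take p := by
    have := List.take_left (l₁ := rem.take p) (l₂ := rem.drop (p + 1))
    rwa [htake] at this
  rw [List.rotate_eq_drop_append_take (Nat.le_of_lt hp),
      List.rotate_eq_drop_append_take hp', h2, h3,
      List.getD_eq_getElem rem (0,0) hp, List.drop_eq_getElem_cons hp,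
      List.cons_append]

-- main invariant: A's deque is B's remaining list rotated so that B's cursor is at the front
theorem loop_eq : ∀ (n : Nat) (rem : List (Int × Int)) (pos : Int) (acc : List Int),
    rem.length = n → 0 ≤ pos → pos.toNat < n →
    poppingLoop (rem.rotate pos.toNat) acc = altLoop n rem pos acc := by
  intro n
  induction n with
  | zero => intro rem pos acc _ _ h; omega
  | succ n ih =>
    intro rem pos acc hL hpos hlt
    have hplt : pos.toNat < rem.length := by omega
    have hrot := rotate_cons_erase rem pos.toNat hplt
    rcases hc : rem.getD pos.toNat (0, 0) with ⟨idx, m⟩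
    rw [hc] at hrot
    have hposcast : pos = ((pos.toNat : Nat) : Int) := (Int.toNat_of_nonneg hpos).symm
    have hslice : PySem.List.slice rem none (some pos) ++ PySem.List.slice rem (some (pos + 1)) none
        = rem.take pos.toNat ++ rem.drop (pos.toNat + 1) := by
      rw [hposcast,
          show ((pos.toNat : Int) + 1) = ((pos.toNat + 1 : Nat) : Int) by push_cast; ring,
          PySem.List.slice_to_natCast, PySem.List.slice_from_natCast]
      simp only [Int.toNat_natCast]
    have hL' : (rem.take pos.toNat ++ rem.drop (pos.toNat + 1)).length = n := by
      simp; omega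
    rw [hrot]
    simp only [poppingLoop, altLoop, hc, hslice, hL']
    by_cases hn : rem.take pos.toNat ++ rem.drop (pos.toNat + 1) = []
    · -- last balloon: the deque empties, the for-loop's fuel runs out
      have hn0 : n = 0 := by rw [← hL', hn]; rfl
      subst hn0
      simp only [hn, List.rotate_nil, altLoop]
      split <;> simp [clock_wise, counter_clock_wise, poppingLoop]
    · have hn0 : 0 < n := by
        rcases Nat.eq_zero_or_pos n with h | h
        · exact absurd (List.eq_nil_of_length_eq_zero (h ▸ hL')) hn
        · exact h
      have hrne : (rem.take pos.toNat ++ rem.drop (pos.toNat + 1)).rotate pos.toNat ≠ [] := by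
        simpa [List.rotate_eq_nil_iff] using hn
      rw [if_neg hn]
      set rem' := rem.take pos.toNat ++ rem.drop (pos.toNat + 1) with hrem'
      by_cases hm : m > 0
      · rw [if_pos hm, if_pos hm]
        have hcw : clock_wise ((idx, m) :: rem'.rotate pos.toNat) m.natAbs
            = rem'.rotate (pos.toNat + (m.natAbs - 1)) := by
          simp only [clock_wise, List.tail_cons]
          rw [if_neg hrne, rotL_eq_rotate, List.rotate_rotate]
        rw [hcw]
        have hlpos : (0 : Int) < ((n : Nat) : Int) := by exact_mod_cast hn0
        have hmodeq : PySem.Int.mod (pos + m - 1) ((n : Nat) : Int)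
            = (((pos.toNat + (m.natAbs - 1)) % n : Nat) : Int) := by
          rw [PySem.Int.mod_eq_emod_of_pos hlpos]
          rw [show pos + m - 1 = ((pos.toNat + (m.natAbs - 1) : Nat) : Int) by omega]
          rw [← Int.natCast_mod]
        have htn : (PySem.Int.mod (pos + m - 1) ((n : Nat) : Int)).toNat
            = (pos.toNat + (m.natAbs - 1)) % n := by
          rw [hmodeq]; exact Int.toNat_natCast _
        rw [show rem'.rotate (pos.toNat + (m.natAbs - 1))
              = rem'.rotate ((PySem.Int.mod (pos + m - 1) ((n : Nat) : Int)).toNat) by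
            rw [htn, ← hL', List.rotate_mod]]
        exact ih rem' _ _ hL'
          (PySem.Int.mod_nonneg _ hlpos)
          (by rw [htn]; exact Nat.mod_lt _ hn0)
      · rw [if_neg hm, if_neg hm]
        have hk : (m.natAbs : Int) = -m := by omega
        have hccw : counter_clock_wise ((idx, m) :: rem'.rotate pos.toNat) m.natAbs
            = rem'.rotate (pos.toNat + (n - 1) * m.natAbs) := by
          simp only [counter_clock_wise, List.tail_cons]
          rw [if_neg hrne, rotR_eq_rotate, List.length_rotate, hL', List.rotate_rotate]
        rw [hccw]
        have hlpos : (0 : Int) < ((n : Nat) : Int) := by exact_mod_cast hn0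
        have hmodeq : PySem.Int.mod (pos + m) ((n : Nat) : Int)
            = (((pos.toNat + (n - 1) * m.natAbs) % n : Nat) : Int) := by
          rw [PySem.Int.mod_eq_emod_of_pos hlpos]
          rw [Int.natCast_mod]
          have hkt : 1 * m.natAbs ≤ n * m.natAbs := Nat.mul_le_mul_right _ hn0
          rw [one_mul] at hkt
          have hcast : ((pos.toNat + (n - 1) * m.natAbs : Nat) : Int)
              = (pos + m) + ((n * m.natAbs : Nat) : Int) := by
            rw [Nat.sub_one_mul]
            omega
          rw [hcast, show ((n * m.natAbs : Nat) : Int) = (n : Int) * (m.natAbs : Int) from by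
                push_cast; ring,
              Int.add_mul_emod_self_left]
        have htn : (PySem.Int.mod (pos + m) ((n : Nat) : Int)).toNat
            = (pos.toNat + (n - 1) * m.natAbs) % n := by
          rw [hmodeq]; exact Int.toNat_natCast _
        rw [show rem'.rotate (pos.toNat + (n - 1) * m.natAbs)
              = rem'.rotate ((PySem.Int.mod (pos + m) ((n : Nat) : Int)).toNat) by
            rw [htn, ← hL', List.rotate_mod]]
        exact ih rem' _ _ hL'
          (PySem.Int.mod_nonneg _ hlpos)
          (by rw [htn]; exact Nat.mod_lt _ hn0)

theorem popping_eq (ballon : List Int) : popping ballon = popping_alt ballon := by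
  cases ballon with
  | nil => simp [popping, popping_alt, PySem.List.enumerate_nil, poppingLoop, altLoop]
  | cons a t =>
    unfold popping popping_alt
    rw [← loop_eq]
    · simp
    · simp [PySem.List.length_enumerate]
    · exact le_refl 0
    · simp

-- ===== VERDICT (by name: the statement is the Claim_ definition above) =====
theorem popping_spec : Claim_equal_popping := by
  intro ballon _
  unfold Spec_popping
  exact popping_eq ballon
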